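-- pv_equiv track=rewrite | github.com/Stephanomejia17/Pensamiento_Algoritmico | EjercicioTipoFinal_3.py | TCVendeMas
-- ===== SOURCE A (Python) =====
-- def TCVendeMas(cantidadPuntosV, m):
--     ventasPC = []
--     Resultado = []
--
--     for j in range(2, 7):
--         valor = 0
--         for i in range(0, cantidadPuntosV):
--             valor += m[i][j]
--         ventasPC.append(valor)
--     Mayor = -999
--     index = 0
--     for i in range(0, len(ventasPC)):
--         if(ventasPC[i] > Mayor):
--             Mayor = ventasPC[i]
--             index = i
--
--     Resultado.append(Mayor)
--     Resultado.append(index)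
--
--     return Resultado
-- ===== SOURCE B (Python) =====
-- def TCVendeMas(cantidadPuntosV, m):
--     totales = [0, 0, 0, 0, 0]
--     for i in range(0, cantidadPuntosV):
--         fila = m[i]
--         totales = [t + v for t, v in zip(totales, fila[2:7])]
--     Mayor = -999
--     index = 0
--     for i, v in enumerate(totales):
--         if v > Mayor:
--             Mayor = v
--             index = i
--     return [Mayor, index]
-- ===== Notes on version B (the rewrite author's own statement) =====
-- stated objective: alternative
-- what changed: A makes five column-major sweeps over the matrix (one per column 2..6); B makes a single row-major pass that accumulates all five column totals at once via zip over the row slice, then the same first-wins sentinel scan picks the maximum.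
import Mathlib
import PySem

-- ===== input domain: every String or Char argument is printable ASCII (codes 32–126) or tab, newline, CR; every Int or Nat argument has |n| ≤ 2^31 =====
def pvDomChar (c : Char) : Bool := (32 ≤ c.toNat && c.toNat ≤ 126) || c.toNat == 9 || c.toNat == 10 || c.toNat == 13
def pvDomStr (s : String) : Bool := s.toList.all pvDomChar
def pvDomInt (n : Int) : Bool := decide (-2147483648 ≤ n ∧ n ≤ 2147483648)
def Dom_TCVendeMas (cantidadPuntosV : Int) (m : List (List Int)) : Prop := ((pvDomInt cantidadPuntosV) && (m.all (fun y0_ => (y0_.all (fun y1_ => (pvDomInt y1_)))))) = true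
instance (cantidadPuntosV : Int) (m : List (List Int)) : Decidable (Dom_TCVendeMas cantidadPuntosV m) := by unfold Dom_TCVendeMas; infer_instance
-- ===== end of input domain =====

-- B replaces A's five column-major sweeps by one row-major pass that accumulates all
-- five column totals at once (objective: alternative decomposition, same asymptotic cost).

-- ===== PORT A =====
def TCVendeMas (cantidadPuntosV : Int) (m : List (List Int)) : List Int :=
  let ventasPC := (PySem.List.pyRange 2 7 1).foldl
    (fun ventasPC j =>
      ventasPC ++ [(PySem.List.pyRange 0 cantidadPuntosV 1).foldl
        (fun valor i => valor + PySem.List.pyGetD (PySem.List.pyGetD m i []) j 0) 0])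
    []
  let s := (PySem.List.pyRange 0 (ventasPC.length : Int) 1).foldl
    (fun (p : Int × Int) i =>
      if PySem.List.pyGetD ventasPC i 0 > p.1 then (PySem.List.pyGetD ventasPC i 0, i) else p)
    (-999, 0)
  [s.1, s.2]

-- ===== PORT B =====
def TCVendeMas_alt (cantidadPuntosV : Int) (m : List (List Int)) : List Int :=
  let totales := (PySem.List.pyRange 0 cantidadPuntosV 1).foldl
    (fun totales i =>
      (totales.zip (PySem.List.slice (PySem.List.pyGetD m i []) (some 2) (some 7))).map
        (fun p => p.1 + p.2))
    [0, 0, 0, 0, 0]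
  let s := (PySem.List.enumerate totales).foldl
    (fun (p : Int × Int) iv => if iv.2 > p.1 then (iv.2, iv.1) else p)
    (-999, 0)
  [s.1, s.2]

-- ===== PRECONDITION & SPEC =====
-- Pre_ excludes exactly the inputs on which A raises IndexError: cantidadPuntosV
-- exceeding the number of rows, or one of the first cantidadPuntosV rows shorter than 7.
def Pre_TCVendeMas (cantidadPuntosV : Int) (m : List (List Int)) : Prop :=
  cantidadPuntosV ≤ (m.length : Int) ∧ ∀ r ∈ m.take cantidadPuntosV.toNat, 7 ≤ r.length
instance (cantidadPuntosV : Int) (m : List (List Int)) : Decidable (Pre_TCVendeMas cantidadPuntosV m) := by unfold Pre_TCVendeMas; infer_instance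
def pvWitness_TCVendeMas : Int × List (List Int) := (2, [[1,1,3,4,5,6,7], [0,0,1,9,2,2,2]])

def Spec_TCVendeMas (cantidadPuntosV : Int) (m : List (List Int)) (out : List Int) : Prop := out = TCVendeMas_alt cantidadPuntosV m
instance (cantidadPuntosV : Int) (m : List (List Int)) (out : List Int) : Decidable (Spec_TCVendeMas cantidadPuntosV m out) := by unfold Spec_TCVendeMas; infer_instance

-- ===== CLAIM (what is proved, stated in full; the proofs are below) =====
def Claim_equal_TCVendeMas : Prop := ∀ (cantidadPuntosV : Int) (m : List (List Int)), Dom_TCVendeMas cantidadPuntosV m → Pre_TCVendeMas cantidadPuntosV m → Spec_TCVendeMas cantidadPuntosV m (TCVendeMas cantidadPuntosV m)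

-- ===== LEMMAS AND PROOFS =====

-- the element read by both programs for row index i, column j
def pvCell (m : List (List Int)) (i j : Int) : Int :=
  PySem.List.pyGetD (PySem.List.pyGetD m i []) j 0

-- B's row step, spelled out on a row of length ≥ 7
lemma pvStepB (m : List (List Int)) (i : Int) (h : 7 ≤ (PySem.List.pyGetD m i []).length)
    (a0 a1 a2 a3 a4 : Int) :
    (([a0,a1,a2,a3,a4].zip (PySem.List.slice (PySem.List.pyGetD m i []) (some 2) (some 7))).map
        (fun p => p.1 + p.2))
      = [a0 + pvCell m i 2, a1 + pvCell m i 3, a2 + pvCell m i 4,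
         a3 + pvCell m i 5, a4 + pvCell m i 6] := by
  set r := PySem.List.pyGetD m i [] with hr
  match r, h with
  | x0::x1::x2::x3::x4::x5::x6::t, _ =>
    rw [PySem.List.slice_toNat _ (by norm_num) (by norm_num)]
    simp only [pvCell]
    rw [← hr]
    simp [PySem.List.pyGetD, PySem.List.pyGet?, PySem.List.pyIdx?]
    refine ⟨?_, ?_, ?_, ?_, ?_⟩ <;> rw [if_pos (by omega)] <;> simp

-- the row-major fold produces exactly the five column sums
lemma pvB_inv (m : List (List Int)) (L : List Int)
    (hL : ∀ i ∈ L, 7 ≤ (PySem.List.pyGetD m i []).length) (a0 a1 a2 a3 a4 : Int) :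
    L.foldl (fun totales i =>
        (totales.zip (PySem.List.slice (PySem.List.pyGetD m i []) (some 2) (some 7))).map
          (fun p => p.1 + p.2)) [a0,a1,a2,a3,a4]
      = [a0 + (L.map (fun i => pvCell m i 2)).sum,
         a1 + (L.map (fun i => pvCell m i 3)).sum,
         a2 + (L.map (fun i => pvCell m i 4)).sum,
         a3 + (L.map (fun i => pvCell m i 5)).sum,
         a4 + (L.map (fun i => pvCell m i 6)).sum] := by
  induction L generalizing a0 a1 a2 a3 a4 with
  | nil => simp
  | cons i L ih =>
    rw [List.foldl_cons, pvStepB m i (hL i (by simp)),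
        ih (fun j hj => hL j (by simp [hj]))]
    simp [add_assoc]

-- the sentinel scan: A's index loop on a 5-element list = B's enumerate loop
lemma pvScan (c0 c1 c2 c3 c4 : Int) :
    (PySem.List.pyRange 0 (([c0,c1,c2,c3,c4] : List Int).length : Int) 1).foldl
      (fun (p : Int × Int) i =>
        if PySem.List.pyGetD [c0,c1,c2,c3,c4] i 0 > p.1
        then (PySem.List.pyGetD [c0,c1,c2,c3,c4] i 0, i) else p) (-999, 0)
      = (PySem.List.enumerate [c0,c1,c2,c3,c4]).foldl
          (fun (p : Int × Int) iv => if iv.2 > p.1 then (iv.2, iv.1) else p) (-999, 0) := by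
  have hlen : (([c0,c1,c2,c3,c4] : List Int).length : Int) = 5 := by simp
  have h5 : PySem.List.pyRange 0 5 1 = [0,1,2,3,4] := by decide
  rw [hlen, h5]
  simp [PySem.List.enumerate, PySem.List.pyGetD, PySem.List.pyGet?, PySem.List.pyIdx?]

-- ===== VERDICT (by name: the statement is the Claim_ definition above) =====
theorem TCVendeMas_spec : Claim_equal_TCVendeMas := by
  intro cpv m _ hpre
  obtain ⟨h1, h2⟩ := hpre
  have hL : ∀ i ∈ PySem.List.pyRange 0 cpv 1, 7 ≤ (PySem.List.pyGetD m i []).length := by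
    intro i hi
    rw [PySem.List.mem_pyRange_one] at hi
    have hilt : i < (m.length : Int) := lt_of_lt_of_le hi.2 h1
    rw [PySem.List.pyGetD_eq_getElem m [] hi.1 hilt]
    have hk : i.toNat < cpv.toNat := by omega
    have hk2 : i.toNat < (m.take cpv.toNat).length := by
      simp [List.length_take]; omega
    have := h2 ((m.take cpv.toNat)[i.toNat]) (List.getElem_mem hk2)
    rwa [List.getElem_take] at this
  have h27 : PySem.List.pyRange 2 7 1 = [2,3,4,5,6] := by decide
  unfold Spec_TCVendeMas TCVendeMas TCVendeMas_alt
  rw [h27,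
      pvB_inv m (PySem.List.pyRange 0 cpv 1) hL 0 0 0 0 0]
  simp only [List.foldl_cons, List.foldl_nil, List.nil_append, List.cons_append,
    PySem.List.foldl_add]
  rw [pvScan]
  simp [pvCell]
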